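-- pv_equiv track=rewrite | github.com/glowisn/programmers | myTest01.py | solution
-- ===== SOURCE A (Python) =====
-- from collections import OrderedDict
--
-- def solution(arr:list):
--     answer = []
--     od = OrderedDict()
--     for el in arr:
--         if el in od:
--             od[el] += 1
--         else:
--             od[el] = 1
--     for key,item in od.items():
--         if item != 1:
--             answer.append(item)
--     return [-1] if len(answer) == 0 else answer
-- ===== SOURCE B (Python) =====
-- def solution(arr: list):
--     # Iterative partition-and-remove: repeatedly take the first remaining element,
--     # strip all its occurrences out of the remaining list, and read its count off
--     # the length drop. No dict needed; first-occurrence order falls out of the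
--     # removal order.
--     out = []
--     rest = arr
--     while rest:
--         x = rest[0]
--         kept = [y for y in rest if y != x]
--         c = len(rest) - len(kept)
--         rest = kept
--         if c > 1:
--             out.append(c)
--     return out if out else [-1]
-- ===== Notes on version B (the rewrite author's own statement) =====
-- stated objective: alternative
-- what changed: Replaces A's single-pass OrderedDict count table plus a second filtering loop by a dict-free partition loop that repeatedly strips all occurrences of the first remaining element from the list and reads its count off the length drop.
import Mathlib
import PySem

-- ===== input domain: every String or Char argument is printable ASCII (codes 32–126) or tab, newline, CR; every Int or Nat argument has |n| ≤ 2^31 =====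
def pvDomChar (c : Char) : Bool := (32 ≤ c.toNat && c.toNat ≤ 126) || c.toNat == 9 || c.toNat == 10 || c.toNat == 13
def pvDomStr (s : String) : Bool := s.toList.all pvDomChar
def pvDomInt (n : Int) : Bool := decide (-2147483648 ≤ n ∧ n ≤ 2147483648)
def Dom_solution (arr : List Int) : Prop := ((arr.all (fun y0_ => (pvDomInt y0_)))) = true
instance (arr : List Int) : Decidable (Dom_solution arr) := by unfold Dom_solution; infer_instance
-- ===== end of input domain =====

-- B replaces A's OrderedDict count table + filter loop by a dict-free partition loop that
-- strips the first remaining element's occurrences and keeps the length drop (alternative, not faster).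

-- ===== PORT A =====
def solution (arr : List Int) : List Int :=
  -- od[el] += 1 is ported as insert el (getD el 0 + 1); exact since the branch guarantees el ∈ od
  let od := arr.foldl (fun od el =>
    if od.contains el then od.insert el (od.getD el 0 + 1) else od.insert el 1)
    PySem.Dict.empty
  let answer := od.items.foldl (fun answer ki =>
    if ki.2 ≠ 1 then answer ++ [ki.2] else answer) ([] : List Int)
  if answer.length = 0 then [-1] else answer

-- ===== PORT B =====
-- the while loop: strip the head's occurrences from rest, read the count off the length drop
def solutionGo : List Int → List Int → List Int
  | [], out => out
  | x :: tail, out =>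
    let kept := (x :: tail).filter (fun y => !(y == x))
    let c : Int := ((x :: tail).length : Int) - (kept.length : Int)
    solutionGo kept (if c > 1 then out ++ [c] else out)
termination_by l _ => l.length
decreasing_by
  simp only [List.filter_cons, BEq.rfl, Bool.not_true, Bool.false_eq_true, if_false,
    List.length_cons, Nat.lt_succ_iff]
  exact List.length_filter_le _ tail

def solution_alt (arr : List Int) : List Int :=
  let res := solutionGo arr []
  if res = [] then [-1] else res

-- ===== PRECONDITION & SPEC =====
def Spec_solution (arr : List Int) (out : List Int) : Prop := out = solution_alt arr
instance (arr : List Int) (out : List Int) : Decidable (Spec_solution arr out) := by unfold Spec_solution; infer_instance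

-- ===== CLAIM (what is proved, stated in full; the proofs are below) =====
def Claim_equal_solution : Prop := ∀ (arr : List Int), Dom_solution arr → Spec_solution arr (solution arr)

-- ===== LEMMAS AND PROOFS =====

-- A's counting loop builds exactly Counter(arr)
theorem solution_fold_eq_counter (arr : List Int) :
    arr.foldl (fun od el =>
      if od.contains el then od.insert el (od.getD el 0 + 1) else od.insert el 1)
      PySem.Dict.empty = PySem.Dict.counter arr := by
  rw [← PySem.Dict.foldl_insert_getD_add_one_eq_counter]
  have hf : (fun (od : PySem.Dict Int Int) el =>
      if od.contains el then od.insert el (od.getD el 0 + 1) else od.insert el 1)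
      = (fun (d : PySem.Dict Int Int) x => d.insert x (d.getD x 0 + 1)) := by
    funext d x
    by_cases h : d.contains x = true
    · simp [h]
    · simp [h, PySem.Dict.getD_of_not_contains]
  rw [hf]

theorem foldl_items_filter (l : List Int) (f : Int → Int) (acc : List Int) :
    List.foldl (fun answer ki => if ki.2 ≠ 1 then answer ++ [ki.2] else answer) acc
      (l.map (fun k => (k, f k)))
    = acc ++ (l.filter (fun k => f k ≠ 1)).map f := by
  induction l generalizing acc with
  | nil => simp
  | cons x xs ih =>
    by_cases h : f x = 1
    · simpa [h] using ih acc
    · simpa [h, List.append_assoc] using ih (acc ++ [f x])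

-- A's answer list, in closed form: counts of first-occurrence distinct elements with count > 1
theorem solution_answer_eq (arr : List Int) :
    (PySem.Dict.counter arr).items.foldl (fun answer ki =>
      if ki.2 ≠ 1 then answer ++ [ki.2] else answer) ([] : List Int)
    = ((PySem.List.dedup arr).filter
        (fun x => arr.count x > 1)).map (fun x => (arr.count x : Int)) := by
  rw [PySem.Dict.items_counter, foldl_items_filter]
  simp only [PySem.List.dedup_eq_ofList, List.nil_append]
  congr 1
  apply List.filter_congr
  intro x hx
  have hmem : x ∈ arr := (PySem.Set.mem_ofList arr x).mp hx
  have hpos : 0 < arr.count x := List.count_pos_iff.mpr hmem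
  simp only [decide_eq_decide]
  omega

-- discard is literally a filter
theorem discard_eq_filter (s : List Int) (x : Int) :
    PySem.Set.discard s x = s.filter (fun y => !(y == x)) := rfl

-- dedup commutes with removing every copy of x
theorem dedup_filter_ne (t : List Int) (x : Int) :
    PySem.List.dedup (t.filter (fun y => !(y == x)))
    = (PySem.List.dedup t).filter (fun y => !(y == x)) := by
  induction t with
  | nil => simp [PySem.List.dedup_eq_ofList, PySem.Set.ofList_nil]
  | cons a t ih =>
    simp only [List.filter_cons]
    by_cases h : a = x
    · subst h
      simp only [BEq.rfl, Bool.not_true, Bool.false_eq_true, if_false,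
        PySem.List.dedup_eq_ofList, PySem.Set.ofList_cons, discard_eq_filter] at *
      rw [ih, List.filter_cons]
      simp
    · have hb : (!(a == x)) = true := by simp [h]
      rw [if_pos hb]
      simp only [PySem.List.dedup_eq_ofList, PySem.Set.ofList_cons,
        discard_eq_filter] at ih ⊢
      rw [ih, List.filter_cons, if_pos hb]
      congr 1
      rw [List.filter_filter, List.filter_filter]
      apply List.filter_congr
      intro y _; simp [Bool.and_comm]

-- removing every copy of x drops the length by exactly count x
theorem filter_length_count (l : List Int) (x : Int) :
    (l.filter (fun y => !(y == x))).length + l.count x = l.length := by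
  induction l with
  | nil => simp
  | cons a l ih =>
    by_cases h : a = x
    · subst h; simp; omega
    · simp [h]; omega

-- the loop computes the closed form, appended to the accumulator
theorem solutionGo_eq (arr : List Int) (out : List Int) :
    solutionGo arr out
    = out ++ ((PySem.List.dedup arr).filter
        (fun x => arr.count x > 1)).map (fun x => (arr.count x : Int)) := by
  induction hn : arr.length using Nat.strong_induction_on generalizing arr out with
  | _ n ih =>
    match arr with
    | [] =>
      rw [solutionGo.eq_def]
      dsimp only
      simp [PySem.List.dedup_eq_ofList, PySem.Set.ofList_nil]
    | x :: tail =>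
      rw [solutionGo.eq_def]
      dsimp only
      have hk : (x :: tail).filter (fun y => !(y == x))
          = tail.filter (fun y => !(y == x)) := by simp
      rw [hk]
      have hlt : (tail.filter (fun y => !(y == x))).length < n := by
        subst hn
        simp only [List.length_cons, Nat.lt_succ_iff]
        exact List.length_filter_le _ tail
      rw [ih _ hlt _ _ rfl, dedup_filter_ne]
      have hded : PySem.List.dedup (x :: tail)
          = x :: (PySem.List.dedup tail).filter (fun y => !(y == x)) := by
        simp only [PySem.List.dedup_eq_ofList, PySem.Set.ofList_cons, discard_eq_filter]
      rw [hded]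
      have hcount : ∀ y ∈ (PySem.List.dedup tail).filter (fun y => !(y == x)),
          List.count y (tail.filter (fun y => !(y == x))) = List.count y (x :: tail) := by
        intro y hy
        have hyx : y ≠ x := by
          have := List.of_mem_filter hy; simpa using this
        rw [List.count_filter (by simpa using hyx)]
        simp [Ne.symm hyx]
      have hlen := filter_length_count (x :: tail) x
      rw [hk] at hlen
      have hcx : ((x :: tail).length : Int) - ((tail.filter (fun y => !(y == x))).length : Int)
          = (List.count x (x :: tail) : Int) := by
        omega
      have hfilter :
          List.filter (fun y => decide (List.count y (tail.filter (fun y => !(y == x))) > 1))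
            ((PySem.List.dedup tail).filter (fun y => !(y == x)))
          = List.filter (fun y => decide (List.count y (x :: tail) > 1))
            ((PySem.List.dedup tail).filter (fun y => !(y == x))) :=
        List.filter_congr (fun y hy => by rw [hcount y hy])
      have hmap :
          (List.filter (fun y => decide (List.count y (x :: tail) > 1))
            ((PySem.List.dedup tail).filter (fun y => !(y == x)))).map
            (fun y => (List.count y (tail.filter (fun y => !(y == x))) : Int))
          = (List.filter (fun y => decide (List.count y (x :: tail) > 1))
            ((PySem.List.dedup tail).filter (fun y => !(y == x)))).map
            (fun y => (List.count y (x :: tail) : Int)) :=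
        List.map_congr_left (fun y hy => by rw [hcount y (List.mem_of_mem_filter hy)])
      rw [hfilter, hmap, hcx]
      by_cases hc : (List.count x (x :: tail) : Int) > 1
      · have hnat : 1 < List.count x (x :: tail) := by exact_mod_cast hc
        have hcx' : decide (List.count x (x :: tail) > 1) = true := decide_eq_true hnat
        rw [if_pos hc]
        simp only [List.filter_cons, hcx', if_true, List.map_cons, List.append_assoc,
          List.singleton_append]
      · have hnat : ¬ (1 < List.count x (x :: tail)) := by
          intro hgt
          exact hc (by exact_mod_cast hgt)
        have hcx' : decide (List.count x (x :: tail) > 1) = false := decide_eq_false hnat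
        rw [if_neg hc]
        simp only [List.filter_cons, hcx', Bool.false_eq_true, if_false]

-- ===== VERDICT (by name: the statement is the Claim_ definition above) =====
theorem solution_spec : Claim_equal_solution := by
  intro arr _
  unfold Spec_solution solution solution_alt
  simp only [solution_fold_eq_counter, solution_answer_eq, solutionGo_eq,
    List.nil_append, List.length_eq_zero_iff]
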